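-- pv_equiv track=rewrite | github.com/MrBrantCode/unitest_baseline | mut_generate/mist_train_taco/taco_5995/solution.py | update_arithmetic_progression
-- ===== SOURCE A (Python) =====
-- def update_arithmetic_progression(N, a, d, M, statements, K):
--     mem = {}
--
--     def get_mem(num):
--         if num in mem:
--             return mem[num]
--         else:
--             return num
--
--     for (x, y, z) in statements:
--         if x == 0:
--             (ny, nz) = (get_mem(y), get_mem(z))
--             mem[y] = nz
--             mem[z] = ny
--         if x == 1:
--             nz = get_mem(z)
--             mem[y] = nz
--
--     k_value = get_mem(K)
--     return a + d * (k_value - 1)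
-- ===== SOURCE B (Python) =====
-- def update_arithmetic_progression(N, a, d, M, statements, K):
--     # Track the provenance of cell K backward through the statements.
--     current = K
--     for (x, y, z) in reversed(statements):
--         if x == 0:
--             if current == y:
--                 current = z
--             elif current == z:
--                 current = y
--         elif x == 1:
--             if current == y:
--                 current = z
--     return a + d * (current - 1)
-- ===== Notes on version B (the rewrite author's own statement) =====
-- stated objective: alternative
-- what changed: Instead of simulating all assignments/swaps into a dict and then looking up K, B tracks the provenance of K backward through the statements in reverse, keeping a single integer instead of a mapping.
import Mathlib
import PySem

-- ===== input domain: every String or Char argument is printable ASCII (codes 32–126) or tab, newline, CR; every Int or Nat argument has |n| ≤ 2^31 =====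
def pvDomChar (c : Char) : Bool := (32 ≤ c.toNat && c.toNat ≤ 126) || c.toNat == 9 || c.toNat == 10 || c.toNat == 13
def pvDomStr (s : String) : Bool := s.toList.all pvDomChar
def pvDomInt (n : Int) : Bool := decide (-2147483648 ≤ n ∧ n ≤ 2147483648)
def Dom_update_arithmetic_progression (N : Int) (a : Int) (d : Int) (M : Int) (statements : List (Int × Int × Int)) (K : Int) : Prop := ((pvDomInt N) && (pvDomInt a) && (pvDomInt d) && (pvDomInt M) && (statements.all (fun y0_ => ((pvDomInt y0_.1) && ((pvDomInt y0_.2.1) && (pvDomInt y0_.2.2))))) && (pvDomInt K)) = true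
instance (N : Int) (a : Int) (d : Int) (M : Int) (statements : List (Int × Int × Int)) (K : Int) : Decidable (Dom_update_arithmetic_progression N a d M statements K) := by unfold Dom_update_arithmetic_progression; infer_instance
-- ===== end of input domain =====

-- B replaces A's forward dict simulation by a backward provenance scan keeping one integer (alternative decomposition, same cost).

-- ===== PORT A =====
-- get_mem: if num in mem: return mem[num] else: return num
def pvGetMem (mem : PySem.Dict Int Int) (num : Int) : Int :=
  if mem.contains num then mem.getD num num else num

-- one loop iteration of A (two successive ifs, as in the Python)
def pvStepA (mem : PySem.Dict Int Int) (s : Int × Int × Int) : PySem.Dict Int Int :=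
  let (x, y, z) := s
  let mem :=
    if x == 0 then
      let ny := pvGetMem mem y
      let nz := pvGetMem mem z
      (mem.insert y nz).insert z ny
    else mem
  if x == 1 then mem.insert y (pvGetMem mem z) else mem

def update_arithmetic_progression (N : Int) (a : Int) (d : Int) (M : Int) (statements : List (Int × Int × Int)) (K : Int) : Int :=
  let mem := statements.foldl pvStepA PySem.Dict.empty
  let k_value := pvGetMem mem K
  a + d * (k_value - 1)

-- ===== PORT B =====
-- one reverse-scan step of B: where did the value now at `cur` come from before statement s?
def pvBackB (cur : Int) (s : Int × Int × Int) : Int :=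
  let (x, y, z) := s
  if x == 0 then
    if cur == y then z else if cur == z then y else cur
  else if x == 1 then
    if cur == y then z else cur
  else cur

def update_arithmetic_progression_alt (N : Int) (a : Int) (d : Int) (M : Int) (statements : List (Int × Int × Int)) (K : Int) : Int :=
  let current := statements.reverse.foldl pvBackB K
  a + d * (current - 1)

-- ===== PRECONDITION & SPEC =====
def Spec_update_arithmetic_progression (N : Int) (a : Int) (d : Int) (M : Int) (statements : List (Int × Int × Int)) (K : Int) (out : Int) : Prop := out = update_arithmetic_progression_alt N a d M statements K
instance (N : Int) (a : Int) (d : Int) (M : Int) (statements : List (Int × Int × Int)) (K : Int) (out : Int) : Decidable (Spec_update_arithmetic_progression N a d M statements K out) := by unfold Spec_update_arithmetic_progression; infer_instance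

-- ===== CLAIM (what is proved, stated in full; the proofs are below) =====
def Claim_equal_update_arithmetic_progression : Prop := ∀ (N : Int) (a : Int) (d : Int) (M : Int) (statements : List (Int × Int × Int)) (K : Int), Dom_update_arithmetic_progression N a d M statements K → Spec_update_arithmetic_progression N a d M statements K (update_arithmetic_progression N a d M statements K)

-- ===== LEMMAS AND PROOFS =====

-- get_mem is getD with the key itself as default
theorem pvGetMem_eq_getD (mem : PySem.Dict Int Int) (num : Int) :
    pvGetMem mem num = mem.getD num num := by
  unfold pvGetMem
  by_cases h : mem.contains num = true
  · simp [h]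
  · rw [if_neg h, PySem.Dict.getD_of_not_contains]
    simpa using h

-- one forward dict step, read at q, equals reading the old dict at the back-tracked address
theorem pvStep_getD (mem : PySem.Dict Int Int) (s : Int × Int × Int) (q : Int) :
    (pvStepA mem s).getD q q = mem.getD (pvBackB q s) (pvBackB q s) := by
  obtain ⟨x, y, z⟩ := s
  unfold pvStepA pvBackB
  by_cases hx0 : x = 0
  · simp only [hx0, beq_self_eq_true, if_pos, show ((0:Int) == 1) = false by decide,
      Bool.false_eq_true, if_false, if_true]
    by_cases hqy : q = y
    · subst hqy
      by_cases hqz : q = z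
      · subst hqz
        simp [PySem.Dict.getD_insert, pvGetMem_eq_getD]
      · simp [PySem.Dict.getD_insert, hqz, pvGetMem_eq_getD]
    · by_cases hqz : q = z
      · subst hqz
        simp [PySem.Dict.getD_insert, pvGetMem_eq_getD, hqy]
      · simp [PySem.Dict.getD_insert, hqy, hqz]
  · by_cases hx1 : x = 1
    · subst hx1
      simp only [show ((1:Int) == 0) = false by decide, Bool.false_eq_true, if_false,
        beq_self_eq_true, if_true]
      by_cases hqy : q = y
      · subst hqy
        simp [PySem.Dict.getD_insert, pvGetMem_eq_getD]
      · simp [PySem.Dict.getD_insert, hqy]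
    · simp [beq_iff_eq, hx0, hx1]

-- the whole forward simulation read at q equals the reverse provenance scan from q
theorem foldl_getD_eq_back (l : List (Int × Int × Int)) (q : Int) :
    (l.foldl pvStepA PySem.Dict.empty).getD q q = l.reverse.foldl pvBackB q := by
  induction l using List.reverseRecOn generalizing q with
  | nil => simp [PySem.Dict.getD_empty]
  | append_singleton l s ih =>
      rw [List.foldl_append, List.foldl_cons, List.reverse_append]
      simp only [List.reverse_cons, List.reverse_nil, List.nil_append, List.singleton_append,
        List.foldl_nil, List.foldl_cons]
      rw [pvStep_getD, ih]

-- ===== VERDICT (by name: the statement is the Claim_ definition above) =====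
theorem update_arithmetic_progression_spec : Claim_equal_update_arithmetic_progression := by
  intro N a d M statements K _
  show _ = _
  unfold update_arithmetic_progression update_arithmetic_progression_alt
  simp only [pvGetMem_eq_getD, foldl_getD_eq_back]
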